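-- pv_equiv track=rewrite | github.com/raeez/chiral-bar-cobar | compute/tests/test_minimal_resolution_chiral_engine.py | _riordan_independent
-- ===== SOURCE A (Python) =====
-- def _motzkin_independent(n: int) -> int:
--     """Motzkin numbers by the path-count recurrence M(n) = M(n-1) + sum M(i)M(n-2-i)."""
--     if n < 0:
--         return 0
--     M = [0] * (n + 1)
--     M[0] = 1
--     if n >= 1:
--         M[1] = 1
--     for k in range(2, n + 1):
--         M[k] = M[k - 1]
--         for i in range(k - 1):
--             M[k] += M[i] * M[k - 2 - i]
--     return M[k] if n >= 2 else M[n]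
--
-- def _riordan_independent(n: int) -> int:
--     """Riordan numbers via the identity R(n) = M(n) - R(n-1) for n>=1, R(0)=1, where M=Motzkin."""
--     if n == 0:
--         return 1
--     if n == 1:
--         return 0
--     R = [0] * (n + 1)
--     R[0] = 1
--     R[1] = 0
--     for k in range(2, n + 1):
--         R[k] = _motzkin_independent(k) - R[k - 1]
--     return R[n]
-- ===== SOURCE B (Python) =====
-- def _riordan_independent(n: int) -> int:
--     """Riordan numbers: build the Motzkin table ONCE in O(n^2), then one
--     subtraction pass R(k) = M(k) - R(k-1)."""
--     if n == 0:
--         return 1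
--     if n == 1:
--         return 0
--     M = [0] * (n + 1)
--     M[0] = 1
--     M[1] = 1
--     for k in range(2, n + 1):
--         M[k] = M[k - 1] + sum(M[i] * M[k - 2 - i] for i in range(k - 1))
--     r = 1
--     for k in range(1, n + 1):
--         r = M[k] - r
--     return r
-- ===== Notes on version B (the rewrite author's own statement) =====
-- stated objective: faster
-- what changed: A rebuilds the full Motzkin table from scratch inside every iteration of the Riordan loop (cubic); B builds the Motzkin table once (quadratic) and then folds R(k)=M(k)-R(k-1) in a single pass.
import Mathlib
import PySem

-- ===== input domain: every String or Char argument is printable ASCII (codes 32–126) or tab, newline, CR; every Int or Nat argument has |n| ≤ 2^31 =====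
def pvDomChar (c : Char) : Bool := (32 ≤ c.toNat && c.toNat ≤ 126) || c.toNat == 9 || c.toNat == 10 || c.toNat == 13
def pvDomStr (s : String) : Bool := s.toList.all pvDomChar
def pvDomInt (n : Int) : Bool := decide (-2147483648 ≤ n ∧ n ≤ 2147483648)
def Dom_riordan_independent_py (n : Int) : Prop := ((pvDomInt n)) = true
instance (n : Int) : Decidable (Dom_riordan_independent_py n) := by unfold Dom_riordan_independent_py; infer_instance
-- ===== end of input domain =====

-- B replaces A's per-k recomputation of the whole Motzkin table by one table build
-- plus a single subtraction pass (measured faster in a timing run); return values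
-- proved equal on nonnegative n.

-- ===== PORT A =====
-- Loop bodies are named helpers (one per Python loop); indices are Nat since all
-- Python indices here are provably nonnegative in range under Pre_.

-- body of the inner 'for k in range(2, n+1)' of _motzkin_independent:
-- M[k] = M[k-1]; for i in range(k-1): M[k] += M[i]*M[k-2-i]
def pvStepMotA (M : List Int) (k : Nat) : List Int :=
  M.set k ((List.range (k - 1)).foldl
    (fun a i => a + M.getD i 0 * M.getD (k - 2 - i) 0) (M.getD (k - 1) 0))

-- port of _motzkin_independent
def motzkin_independent_py (n : Int) : Int :=
  if n < 0 then 0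
  else
    let N := n.toNat
    let M : List Int := List.replicate (N + 1) 0
    let M := M.set 0 1
    let M := if 1 ≤ n then M.set 1 1 else M
    let M := (List.range' 2 (N + 1 - 2)).foldl pvStepMotA M
    -- 'return M[k] if n >= 2 else M[n]': after the loop k = n when n ≥ 2, so both arms read M[n]
    if 2 ≤ n then M.getD N 0 else M.getD N 0

-- body of 'for k in range(2, n+1)': R[k] = _motzkin_independent(k) - R[k-1]
def pvStepRioA (R : List Int) (k : Nat) : List Int :=
  R.set k (motzkin_independent_py (k : Int) - R.getD (k - 1) 0)

def riordan_independent_py (n : Int) : Int :=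
  if n = 0 then 1
  else if n = 1 then 0
  else
    let N := n.toNat
    let R : List Int := List.replicate (N + 1) 0
    let R := R.set 0 1
    let R := R.set 1 0
    let R := (List.range' 2 (N + 1 - 2)).foldl pvStepRioA R
    R.getD N 0

-- ===== PORT B =====
-- body of B's table loop: M[k] = M[k-1] + sum(M[i]*M[k-2-i] for i in range(k-1))
def pvStepMotB (M : List Int) (k : Nat) : List Int :=
  M.set k (M.getD (k - 1) 0 + (List.range (k - 1)).foldl
    (fun a i => a + M.getD i 0 * M.getD (k - 2 - i) 0) 0)

def riordan_independent_py_alt (n : Int) : Int :=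
  if n = 0 then 1
  else if n = 1 then 0
  else
    let N := n.toNat
    let M : List Int := List.replicate (N + 1) 0
    let M := M.set 0 1
    let M := M.set 1 1
    let M := (List.range' 2 (N + 1 - 2)).foldl pvStepMotB M
    -- r = 1; for k in range(1, n+1): r = M[k] - r
    (List.range' 1 N).foldl (fun r k => M.getD k 0 - r) 1

-- ===== PRECONDITION & SPEC =====
-- Python A raises IndexError for negative n (R = [0]*(n+1) is too short); excluded.
def Pre_riordan_independent_py (n : Int) : Prop := 0 ≤ n
instance (n : Int) : Decidable (Pre_riordan_independent_py n) := by unfold Pre_riordan_independent_py; infer_instance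
def pvWitness_riordan_independent_py : Int := (5)

def Spec_riordan_independent_py (n : Int) (out : Int) : Prop := out = riordan_independent_py_alt n
instance (n : Int) (out : Int) : Decidable (Spec_riordan_independent_py n out) := by unfold Spec_riordan_independent_py; infer_instance

-- ===== CLAIM (what is proved, stated in full; the proofs are below) =====
def Claim_equal_riordan_independent_py : Prop := ∀ (n : Int), Dom_riordan_independent_py n → Pre_riordan_independent_py n → Spec_riordan_independent_py n (riordan_independent_py n)

-- ===== LEMMAS AND PROOFS =====

-- reference sequences
def mot : Nat → Int
  | 0 => 1
  | 1 => 1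
  | (k + 2) => mot (k + 1) + (List.range (k + 1)).attach.foldl (fun a i => a + mot i.1 * mot (k - i.1)) 0
decreasing_by
  · omega
  · have := i.2; simp [List.mem_range] at this; omega
  · have := i.2; simp [List.mem_range] at this; omega

def rio : Nat → Int
  | 0 => 1
  | (m + 1) => mot (m + 1) - rio m

theorem pv_mot_succ_succ (k : Nat) :
    mot (k + 2) = mot (k + 1) + (List.range (k + 1)).foldl (fun a i => a + mot i * mot (k - i)) 0 := by
  rw [mot]
  exact congrArg (fun s => mot (k + 1) + s)
    (List.foldl_attach (l := List.range (k + 1)) (f := fun (a : Int) (i : Nat) => a + mot i * mot (k - i)) (b := 0))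

theorem pv_foldl_add_shift (l : List Nat) (f : Nat → Int) (c : Int) :
    l.foldl (fun a i => a + f i) c = c + l.foldl (fun a i => a + f i) 0 := by
  induction l generalizing c with
  | nil => simp
  | cons x xs ih => simp only [List.foldl_cons]; rw [ih (c + f x), ih (0 + f x)]; ring

theorem pv_foldl_add_congr (l : List Nat) (f g : Nat → Int) (c : Int)
    (h : ∀ i ∈ l, f i = g i) :
    l.foldl (fun a i => a + f i) c = l.foldl (fun a i => a + g i) c := by
  induction l generalizing c with
  | nil => rfl
  | cons x xs ih =>
      simp only [List.foldl_cons]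
      rw [h x (by simp), ih _ (fun i hi => h i (by simp [hi]))]

theorem pv_getD_set_self (l : List Int) (k : Nat) (v : Int) (h : k < l.length) :
    (l.set k v).getD k 0 = v := by
  simp [List.getD, h]

theorem pv_getD_set_ne (l : List Int) (k j : Nat) (v : Int) (h : j ≠ k) :
    (l.set k v).getD j 0 = l.getD j 0 := by
  simp [List.getD, List.getElem?_set_ne (Ne.symm h)]

-- generic invariant for the 'for k in range(2, n+1): X[k] = …' loops
theorem pv_loop_inv (val : Nat → Int) (f : List Int → Nat → List Int) (N : Nat)
    (hf : ∀ (T : List Int) (k : Nat), 2 ≤ k → T.length = N + 1 →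
        (∀ j, j < k → T.getD j 0 = val j) → f T k = T.set k (val k))
    (m : Nat) (hm : 2 + m ≤ N + 1) :
    (((List.range' 2 m).foldl f (((List.replicate (N + 1) 0).set 0 (val 0)).set 1 (val 1))).length = N + 1)
    ∧ ∀ j, j < 2 + m →
        ((List.range' 2 m).foldl f (((List.replicate (N + 1) 0).set 0 (val 0)).set 1 (val 1))).getD j 0 = val j := by
  induction m with
  | zero =>
      simp only [List.range'_zero, List.foldl_nil]
      refine ⟨by simp, ?_⟩
      intro j hj
      interval_cases j
      · rw [pv_getD_set_ne _ _ _ _ (by omega), pv_getD_set_self _ _ _ (by simp only [List.length_replicate]; omega)]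
      · rw [pv_getD_set_self _ _ _ (by simp only [List.length_set, List.length_replicate]; omega)]
  | succ m ih =>
      have hm' : 2 + m ≤ N + 1 := by omega
      obtain ⟨hlen, hval⟩ := ih hm'
      rw [List.range'_1_concat, List.foldl_append]
      simp only [List.foldl_cons, List.foldl_nil]
      rw [hf _ _ (by omega) hlen (fun j hj => hval j hj)]
      refine ⟨by simp [hlen], ?_⟩
      intro j hj
      by_cases hje : j = 2 + m
      · subst hje; rw [pv_getD_set_self _ _ _ (by rw [hlen]; omega)]
      · rw [pv_getD_set_ne _ _ _ _ hje]; exact hval j (by omega)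

-- the inner 'for i in range(k-1)' sum equals mot's defining sum
theorem pv_inner_sum (T : List Int) (kk : Nat)
    (hT : ∀ j, j < kk + 2 → T.getD j 0 = mot j) (c : Int) :
    (List.range (kk + 1)).foldl (fun a i => a + T.getD i 0 * T.getD (kk + 2 - 2 - i) 0) c
      = c + (List.range (kk + 1)).foldl (fun a i => a + mot i * mot (kk - i)) 0 := by
  rw [pv_foldl_add_congr _ _ (fun i => mot i * mot (kk - i)) c ?_, pv_foldl_add_shift]
  intro i hi
  simp only [List.mem_range] at hi
  have h1 : kk + 2 - 2 - i = kk - i := by omega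
  rw [h1, hT i (by omega), hT (kk - i) (by omega)]

theorem pv_stepMotA_eq (N : Nat) (T : List Int) (k : Nat) (hk : 2 ≤ k)
    (_hlen : T.length = N + 1) (hT : ∀ j, j < k → T.getD j 0 = mot j) :
    pvStepMotA T k = T.set k (mot k) := by
  obtain ⟨kk, rfl⟩ : ∃ kk, k = kk + 2 := ⟨k - 2, by omega⟩
  unfold pvStepMotA
  have h1 : kk + 2 - 1 = kk + 1 := by omega
  rw [h1, pv_inner_sum T kk (fun j hj => hT j hj), hT (kk + 1) (by omega), ← pv_mot_succ_succ]

theorem pv_stepMotB_eq (N : Nat) (T : List Int) (k : Nat) (hk : 2 ≤ k)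
    (_hlen : T.length = N + 1) (hT : ∀ j, j < k → T.getD j 0 = mot j) :
    pvStepMotB T k = T.set k (mot k) := by
  obtain ⟨kk, rfl⟩ : ∃ kk, k = kk + 2 := ⟨k - 2, by omega⟩
  unfold pvStepMotB
  have h1 : kk + 2 - 1 = kk + 1 := by omega
  rw [h1, pv_inner_sum T kk (fun j hj => hT j hj), zero_add, hT (kk + 1) (by omega), ← pv_mot_succ_succ]

theorem pv_mot_eq : ∀ (k : Nat), motzkin_independent_py (k : Int) = mot k := by
  intro k
  match k with
  | 0 =>
      show motzkin_independent_py (0 : Int) = mot 0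
      simp [motzkin_independent_py, mot]
  | 1 =>
      show motzkin_independent_py (1 : Int) = mot 1
      simp [motzkin_independent_py, mot]
  | (kk + 2) =>
      have h0 : ¬ ((kk + 2 : Nat) : Int) < 0 := by omega
      have h1 : (1 : Int) ≤ ((kk + 2 : Nat) : Int) := by omega
      have h2 : (2 : Int) ≤ ((kk + 2 : Nat) : Int) := by omega
      have hN : ((kk + 2 : Nat) : Int).toNat = kk + 2 := by omega
      simp only [motzkin_independent_py, h0, if_false, h1, if_true, h2, hN]
      have hinv := pv_loop_inv mot pvStepMotA (kk + 2)
        (fun T kx hkx hlen hT => pv_stepMotA_eq (kk + 2) T kx hkx hlen hT)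
        (kk + 1) (by omega)
      have harith : kk + 2 + 1 - 2 = kk + 1 := by omega
      rw [harith]
      rw [show mot 0 = (1 : Int) by simp [mot], show mot 1 = (1 : Int) by simp [mot]] at hinv
      exact hinv.2 (kk + 2) (by omega)

theorem pv_stepRioA_eq (N : Nat) (T : List Int) (k : Nat) (hk : 2 ≤ k)
    (_hlen : T.length = N + 1) (hT : ∀ j, j < k → T.getD j 0 = rio j) :
    pvStepRioA T k = T.set k (rio k) := by
  obtain ⟨kk, rfl⟩ : ∃ kk, k = kk + 1 := ⟨k - 1, by omega⟩
  unfold pvStepRioA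
  have h1 : kk + 1 - 1 = kk := by omega
  rw [h1, hT kk (by omega), pv_mot_eq]
  rw [show mot (kk + 1) - rio kk = rio (kk + 1) from (by rw [rio])]

theorem pv_final_fold (T : List Int) (m : Nat)
    (hT : ∀ j, j ≤ m → T.getD j 0 = mot j) :
    (List.range' 1 m).foldl (fun r k => T.getD k 0 - r) 1 = rio m := by
  induction m with
  | zero => rfl
  | succ m ih =>
      rw [List.range'_1_concat, List.foldl_append]
      simp only [List.foldl_cons, List.foldl_nil]
      rw [ih (fun j hj => hT j (by omega)), hT (1 + m) (by omega)]
      have : 1 + m = m + 1 := by omega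
      rw [this, rio]

-- ===== VERDICT (by name: the statement is the Claim_ definition above) =====
theorem riordan_independent_py_spec : Claim_equal_riordan_independent_py := by
  intro n hdom hpre
  unfold Spec_riordan_independent_py
  by_cases h0 : n = 0
  · simp [riordan_independent_py, riordan_independent_py_alt, h0]
  by_cases h1 : n = 1
  · simp [riordan_independent_py, riordan_independent_py_alt, h1]
  have h2 : (2 : Int) ≤ n := by
    unfold Pre_riordan_independent_py at hpre; omega
  obtain ⟨N, hN⟩ : ∃ N : Nat, n.toNat = N + 2 := ⟨n.toNat - 2, by omega⟩
  have hA := pv_loop_inv rio pvStepRioA (N + 2)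
    (fun T kx hkx hlen hT => pv_stepRioA_eq (N + 2) T kx hkx hlen hT)
    (N + 1) (by omega)
  have hB := pv_loop_inv mot pvStepMotB (N + 2)
    (fun T kx hkx hlen hT => pv_stepMotB_eq (N + 2) T kx hkx hlen hT)
    (N + 1) (by omega)
  rw [show rio 0 = (1 : Int) by simp [rio], show rio 1 = (0 : Int) by simp [rio, mot]] at hA
  rw [show mot 0 = (1 : Int) by simp [mot], show mot 1 = (1 : Int) by simp [mot]] at hB
  have harith : N + 2 + 1 - 2 = N + 1 := by omega
  simp only [riordan_independent_py, riordan_independent_py_alt, h0, h1, if_false, hN]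
  rw [harith]
  rw [hA.2 (N + 2) (by omega)]
  rw [pv_final_fold _ (N + 2) (fun j hj => hB.2 j (by omega))]
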